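-- pv_equiv track=rewrite | github.com/m-t-d-32/PAT_B | 3.py | check
-- ===== SOURCE A (Python) =====
-- def check(str):
--     p=0
--     t=0
--     other=0
--     for i in str:
--         if i=='P':
--             p+=1
--         elif i=='T':
--             t+=1
--         elif i!='A':
--             other+=1
--
--     if p==1 and t==1 and other==0 and str.find('P')<str.find('T'):
--         return True
--     else:
--         return False
-- ===== SOURCE B (Python) =====
-- def check(str):
--     # DFA for the pattern A* P A* T A*: state 0 = before P, 1 = after P, 2 = after T
--     state = 0
--     for ch in str:
--         if state == 0:
--             if ch == 'A':
--                 state = 0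
--             elif ch == 'P':
--                 state = 1
--             else:
--                 return False
--         elif state == 1:
--             if ch == 'A':
--                 state = 1
--             elif ch == 'T':
--                 state = 2
--             else:
--                 return False
--         else:
--             if ch != 'A':
--                 return False
--     return state == 2
-- ===== Notes on version B (the rewrite author's own statement) =====
-- stated objective: faster
-- what changed: Replaces A's three character counters plus a find('P')<find('T') position comparison by a single-pass three-state finite automaton recognising A*PA*TA* that rejects on the first offending character.
import Mathlib
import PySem

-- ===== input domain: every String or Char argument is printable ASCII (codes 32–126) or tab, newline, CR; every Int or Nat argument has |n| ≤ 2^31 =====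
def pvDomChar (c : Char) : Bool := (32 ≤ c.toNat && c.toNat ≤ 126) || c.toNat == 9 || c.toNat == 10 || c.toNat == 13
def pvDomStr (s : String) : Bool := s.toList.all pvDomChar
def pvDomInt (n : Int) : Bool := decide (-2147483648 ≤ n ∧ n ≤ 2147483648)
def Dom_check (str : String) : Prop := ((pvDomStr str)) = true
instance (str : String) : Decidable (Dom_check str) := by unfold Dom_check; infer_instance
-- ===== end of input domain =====

-- B replaces A's three counters plus the find('P') < find('T') comparison by a one-pass three-state automaton for A*PA*TA* (objective: alternative).

-- ===== PORT A =====
-- literal port of A: one fold maintaining the counters (p, t, other), then the final test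
def checkLoop (st : Int × Int × Int) (i : Char) : Int × Int × Int :=
  if i = 'P' then (st.1 + 1, st.2.1, st.2.2)
  else if i = 'T' then (st.1, st.2.1 + 1, st.2.2)
  else if i ≠ 'A' then (st.1, st.2.1, st.2.2 + 1)
  else st

def check (str : String) : Bool :=
  let st := str.toList.foldl checkLoop (0, 0, 0)
  if st.1 = 1 ∧ st.2.1 = 1 ∧ st.2.2 = 0 ∧ PySem.Str.find str "P" < PySem.Str.find str "T" then
    true
  else
    false

-- ===== PORT B =====
-- literal port of B: the DFA loop; Python's early 'return False' becomes returning false from the recursion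
def checkAltGo : Nat → List Char → Bool
  | st, [] => st == 2
  | 0, c :: l => if c = 'A' then checkAltGo 0 l else if c = 'P' then checkAltGo 1 l else false
  | 1, c :: l => if c = 'A' then checkAltGo 1 l else if c = 'T' then checkAltGo 2 l else false
  | _, c :: l => if c ≠ 'A' then false else checkAltGo 2 l

def check_alt (str : String) : Bool := checkAltGo 0 str.toList

-- ===== PRECONDITION & SPEC =====
def Spec_check (str : String) (out : Bool) : Prop := out = check_alt str
instance (str : String) (out : Bool) : Decidable (Spec_check str out) := by unfold Spec_check; infer_instance

-- ===== CLAIM (what is proved, stated in full; the proofs are below) =====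
def Claim_equal_check : Prop := ∀ (str : String), Dom_check str → Spec_check str (check str)

-- ===== LEMMAS AND PROOFS =====

def cntO (l : List Char) : Nat := l.countP (fun c => decide (c ≠ 'P' ∧ c ≠ 'T' ∧ c ≠ 'A'))

theorem foldLemma : ∀ (l : List Char) (p t o : Int),
    l.foldl checkLoop (p, t, o) = (p + l.count 'P', t + l.count 'T', o + cntO l) := by
  intro l
  induction l with
  | nil => intro p t o; simp [cntO]
  | cons c l ih =>
    intro p t o
    by_cases hP : c = 'P'
    · simp [checkLoop, hP, ih, cntO]; ring
    · by_cases hT : c = 'T'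
      · simp [checkLoop, hT, ih, cntO]; ring
      · by_cases hA : c = 'A'
        · simp [checkLoop, hA, ih, cntO]
        · simp [checkLoop, hP, hT, hA, ih, cntO, List.count_cons, List.countP_cons]
          omega

theorem go_cons (d c : Char) (l : List Char) (k : Nat) :
    PySem.Chars.find.go [d] (c :: l) k = if c = d then (k : Int) else PySem.Chars.find.go [d] l (k + 1) := by
  simp [PySem.Chars.find.go, List.isPrefixOf]
  by_cases h : c = d <;> simp [h]
  exact fun hdc => absurd hdc.symm h

theorem go_ge (d : Char) : ∀ (l : List Char) (k : Nat), -1 ≤ PySem.Chars.find.go [d] l k := by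
  intro l
  induction l with
  | nil => intro k; simp [PySem.Chars.find.go]
  | cons c l ih =>
    intro k
    rw [go_cons]
    by_cases h : c = d
    · simp [h]
    · simpa [h] using ih (k + 1)

theorem go_shift (d : Char) : ∀ (l : List Char) (k : Nat),
    PySem.Chars.find.go [d] l k =
      if PySem.Chars.find.go [d] l 0 = -1 then -1 else PySem.Chars.find.go [d] l 0 + k := by
  intro l
  induction l with
  | nil => intro k; simp [PySem.Chars.find.go]
  | cons c l ih =>
    intro k
    rw [go_cons, go_cons]
    by_cases h : c = d
    · simp [h]
    · have hge := go_ge d l 0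
      simp [h, ih (k + 1), ih 1]
      split_ifs <;> push_cast <;> omega

theorem find_cons (c d : Char) (l : List Char) :
    PySem.Chars.find (c :: l) [d] =
      if c = d then 0 else (if PySem.Chars.find l [d] = -1 then -1 else PySem.Chars.find l [d] + 1) := by
  simp [PySem.Chars.find, go_cons]
  by_cases h : c = d
  · simp [h]
  · simp [h, go_shift d l 1]

theorem find_mem (d : Char) (l : List Char) (h : d ∈ l) : 0 ≤ PySem.Chars.find l [d] := by
  have h1 : [d] <:+: l := by
    obtain ⟨s, t, rfl⟩ := List.append_of_mem h
    exact ⟨s, t, by simp⟩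
  have := PySem.Chars.find_nonneg_iff (s := l) (sub := [d])
  exact this.mpr h1

theorem go2_char : ∀ l : List Char, checkAltGo 2 l =
    (decide (l.count 'P' = 0) && decide (l.count 'T' = 0) && decide (cntO l = 0)) := by
  intro l
  induction l with
  | nil => simp [checkAltGo, cntO]
  | cons c l ih =>
    by_cases hA : c = 'A'
    · have hP : ¬c = 'P' := by simp [hA]
      have hT : ¬c = 'T' := by simp [hA]
      simp [checkAltGo, hA, hP, hT, ih, List.count_cons, cntO, List.countP_cons]
    · simp [checkAltGo, hA, List.count_cons, cntO, List.countP_cons]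
      by_cases hP : c = 'P'
      · simp [hP]
      · by_cases hT : c = 'T'
        · simp [hT, hP]
        · simp [hP, hT, hA]

theorem go1_char : ∀ l : List Char, checkAltGo 1 l =
    (decide (l.count 'P' = 0) && decide (l.count 'T' = 1) && decide (cntO l = 0)) := by
  intro l
  induction l with
  | nil => simp [checkAltGo]
  | cons c l ih =>
    by_cases hA : c = 'A'
    · have hP : ¬c = 'P' := by simp [hA]
      have hT : ¬c = 'T' := by simp [hA]
      simp [checkAltGo, hA, hP, hT, ih, List.count_cons, cntO, List.countP_cons]
    · by_cases hT : c = 'T'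
      · have hP : ¬c = 'P' := by simp [hT]
        simp [checkAltGo, hA, hT, hP, go2_char, List.count_cons, cntO, List.countP_cons]
      · by_cases hP : c = 'P'
        · simp [checkAltGo, hA, hP, List.count_cons]
        · simp [checkAltGo, hA, hP, hT, cntO, List.countP_cons]

theorem go0_char : ∀ l : List Char, checkAltGo 0 l =
    (decide (l.count 'P' = 1) && decide (l.count 'T' = 1) && decide (cntO l = 0) &&
      decide (PySem.Chars.find l ['P'] < PySem.Chars.find l ['T'])) := by
  intro l
  induction l with
  | nil => simp [checkAltGo]
  | cons c l ih =>
    by_cases hA : c = 'A'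
    · have hP : ¬c = 'P' := by simp [hA]
      have hT : ¬c = 'T' := by simp [hA]
      rw [show checkAltGo 0 (c :: l) = checkAltGo 0 l by simp [checkAltGo, hA, hP], ih]
      by_cases hcp : l.count 'P' = 1
      · by_cases hct : l.count 'T' = 1
        · have hmP : 0 ≤ PySem.Chars.find l ['P'] :=
            find_mem _ _ (List.count_pos_iff.mp (by omega))
          have hmT : 0 ≤ PySem.Chars.find l ['T'] :=
            find_mem _ _ (List.count_pos_iff.mp (by omega))
          simp [find_cons, hP, hT, hA, List.count_cons, hcp, hct, cntO, List.countP_cons]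
          congr 1
          rw [if_neg (by omega : ¬PySem.Chars.find l ['P'] = -1),
            if_neg (by omega : ¬PySem.Chars.find l ['T'] = -1)]
          exact decide_eq_decide.mpr (by omega)
        · simp [List.count_cons, hT, hct]
      · simp [List.count_cons, hP, hcp]
    · by_cases hP : c = 'P'
      · have hT : ¬c = 'T' := by simp [hP]
        rw [show checkAltGo 0 (c :: l) = checkAltGo 1 l by simp [checkAltGo, hA, hP], go1_char]
        by_cases hct : l.count 'T' = 1
        · have hmT : 0 ≤ PySem.Chars.find l ['T'] :=
            find_mem _ _ (List.count_pos_iff.mp (by omega))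
          simp [find_cons, hP, hT, hA, List.count_cons, hct, cntO, List.countP_cons]
          intro _ _
          split_ifs with h1 <;> omega
        · simp [List.count_cons, hT, hct]
      · by_cases hT : c = 'T'
        · rw [show checkAltGo 0 (c :: l) = false by simp [checkAltGo, hA, hP, hT]]
          by_cases hcp : l.count 'P' = 1
          · have hmP : 0 ≤ PySem.Chars.find l ['P'] :=
              find_mem _ _ (List.count_pos_iff.mp (by omega))
            simp [find_cons, hP, hT, List.count_cons, hcp]
            intro h
            split_ifs <;> omega
          · simp [List.count_cons, hP, hcp]
        · rw [show checkAltGo 0 (c :: l) = false by simp [checkAltGo, hA, hP, hT]]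
          simp [cntO, List.countP_cons, hP, hT, hA]

theorem final : ∀ (str : String), check str = check_alt str := by
  intro s
  simp only [check, check_alt, foldLemma, go0_char, PySem.Str.find_eq]
  have hP1 : "P".toList = ['P'] := rfl
  have hT1 : "T".toList = ['T'] := rfl
  rw [hP1, hT1]
  simp only [zero_add]
  by_cases h1 : s.toList.count 'P' = 1 <;>
    by_cases h2 : s.toList.count 'T' = 1 <;>
      by_cases h3 : cntO s.toList = 0 <;>
        by_cases h4 : PySem.Chars.find s.toList ['P'] < PySem.Chars.find s.toList ['T'] <;>
          simp [h1, h2, h3, h4] <;> omega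

-- ===== VERDICT (by name: the statement is the Claim_ definition above) =====
theorem check_spec : Claim_equal_check := fun str _ => final str
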